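-- pv_equiv track=rewrite | github.com/hyomin777/Algorithm | 프로그래머스/0/181830. 정사각형으로 만들기/정사각형으로 만들기.py | solution
-- ===== SOURCE A (Python) =====
-- def solution(arr):
--     rows = len(arr)
--     cols = len(arr[0])
--     longer = max(rows, cols)
--     answer = [[0] * longer for _ in range(longer)]
--
--     for row in range(rows):
--         for col in range(cols):
--             answer[row][col] = arr[row][col]
--
--     return answer
-- ===== SOURCE B (Python) =====
-- def solution(arr):
--     rows = len(arr)
--     cols = len(arr[0])
--
--     def grow(m, r, c):
--         if r < c:
--             return grow(m + [[0] * c], r + 1, c)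
--         if c < r:
--             return grow([row + [0] for row in m], r, c + 1)
--         return m
--
--     return grow([row[:cols] for row in arr], rows, cols)
-- ===== Notes on version B (the rewrite author's own statement) =====
-- stated objective: alternative
-- what changed: Instead of preallocating a max(rows,cols) square of zeros and overwriting its top-left corner with nested index loops, B recursively grows the rows-by-cols rectangle into a square, appending one zero row (or one trailing zero to every row) per recursive step until it is square.
import Mathlib
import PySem

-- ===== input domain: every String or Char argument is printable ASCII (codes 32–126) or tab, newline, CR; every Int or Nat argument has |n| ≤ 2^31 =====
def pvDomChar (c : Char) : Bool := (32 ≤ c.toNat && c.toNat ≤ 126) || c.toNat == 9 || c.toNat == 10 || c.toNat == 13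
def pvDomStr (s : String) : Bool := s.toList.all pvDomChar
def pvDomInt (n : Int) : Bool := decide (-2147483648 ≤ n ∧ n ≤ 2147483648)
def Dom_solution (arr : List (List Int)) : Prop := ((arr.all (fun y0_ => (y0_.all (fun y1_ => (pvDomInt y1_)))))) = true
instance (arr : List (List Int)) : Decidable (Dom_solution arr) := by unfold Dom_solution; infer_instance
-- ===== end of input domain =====

-- B replaces A's preallocate-a-square-of-zeros-and-overwrite nested index loops with a
-- recursive growth: starting from the rows×cols rectangle, append one zero row (or one
-- trailing zero to every row) per step until square; objective: alternative decomposition.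

-- ===== PORT A =====
-- answer[row][col] = arr[row][col] is modeled by List.modify/List.set; the reads arr[0] and
-- arr[row][col] use pyGetD with a default, exact on Pre_ (out of range Python raises, excluded).
def solution (arr : List (List Int)) : List (List Int) :=
  let rows : Int := arr.length
  let cols : Int := (PySem.List.pyGetD arr 0 []).length
  let longer : Int := max rows cols
  let answer : List (List Int) := List.replicate longer.toNat (List.replicate longer.toNat 0)
  (PySem.List.pyRange 0 rows 1).foldl (fun ans row =>
    (PySem.List.pyRange 0 cols 1).foldl (fun ans col =>
      ans.modify row.toNat (fun r =>
        r.set col.toNat (PySem.List.pyGetD (PySem.List.pyGetD arr row []) col 0))) ans) answer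

-- ===== PORT B =====
-- grow is Source B's inner recursive function, step for step.
def grow (m : List (List Int)) (r c : Nat) : List (List Int) :=
  if r < c then grow (m ++ [List.replicate c 0]) (r + 1) c
  else if c < r then grow (m.map (fun row => row ++ [0])) r (c + 1)
  else m
termination_by (c - r) + (r - c)
decreasing_by all_goals omega

def solution_alt (arr : List (List Int)) : List (List Int) :=
  let rows : Nat := arr.length
  let cols : Nat := (arr.headD []).length
  grow (arr.map (fun row => row.take cols)) rows cols

-- ===== PRECONDITION & SPEC =====
-- Pre_ excludes exactly the inputs where A raises IndexError: the empty list (arr[0]) and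
-- ragged inputs where some row is shorter than the first row (arr[row][col]).
def Pre_solution (arr : List (List Int)) : Prop :=
  arr ≠ [] ∧ ∀ r ∈ arr, (arr.headD []).length ≤ r.length
instance (arr : List (List Int)) : Decidable (Pre_solution arr) := by
  unfold Pre_solution; infer_instance
def pvWitness_solution : List (List Int) := [[1, 2], [3, 4], [5, 6]]
def Spec_solution (arr : List (List Int)) (out : List (List Int)) : Prop := out = solution_alt arr
instance (arr : List (List Int)) (out : List (List Int)) : Decidable (Spec_solution arr out) := by unfold Spec_solution; infer_instance

-- ===== CLAIM (what is proved, stated in full; the proofs are below) =====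
def Claim_equal_solution : Prop := ∀ (arr : List (List Int)), Dom_solution arr → Pre_solution arr → Spec_solution arr (solution arr)

-- ===== LEMMAS AND PROOFS =====

-- modify twice at the same index composes
theorem pv_modify_modify {α : Type} (m : List α) (i : Nat) (f g : α → α) :
    (m.modify i f).modify i g = m.modify i (fun x => g (f x)) := by
  apply List.ext_getElem (by simp)
  intro j h1 h2
  simp only [List.getElem_modify]
  split_ifs <;> rfl

-- a fold of same-index modifies is one modify by the folded row update
theorem pv_foldl_modify {α β : Type} (l : List β) (i : Nat) (g : β → α → α) (m : List α) :
    l.foldl (fun m x => m.modify i (g x)) m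
      = m.modify i (fun r => l.foldl (fun r x => g x r) r) := by
  induction l generalizing m with
  | nil =>
    apply List.ext_getElem (by simp)
    intro j h1 h2
    simp [List.getElem_modify]
  | cons b t ih => simp [ih, pv_modify_modify]

-- the inner column loop overwrites the first C cells of r with a's first C cells
theorem pv_inner_loop (a r : List Int) (C : Nat) (ha : C ≤ a.length) (hr : C ≤ r.length) :
    (List.range C).foldl (fun r k => r.set k (a.getD k 0)) r = a.take C ++ r.drop C := by
  induction C with
  | zero => simp
  | succ n ih =>
    rw [List.range_succ, List.foldl_append, ih (Nat.le_of_succ_le ha) (Nat.le_of_succ_le hr)]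
    simp only [List.foldl_cons, List.foldl_nil]
    rw [List.getD_eq_getElem a 0 ha]
    have hlen : (a.take n).length = n := by simp [Nat.le_of_succ_le ha]
    have hdrop : r.drop n = r[n] :: r.drop (n + 1) :=
      (List.drop_eq_getElem_cons hr).trans (by simp)
    have htake : a.take (n + 1) = a.take n ++ [a[n]] := by
      rw [List.take_add_one, List.getElem?_eq_getElem ha]; rfl
    rw [hdrop, List.set_append_right _ _ (by omega), hlen, Nat.sub_self,
      List.set_cons_zero, htake, List.append_assoc]
    rfl

-- the outer row loop modifies at the distinct indices 0..n-1
theorem pv_outer_loop {α : Type} (f : Nat → α → α) (d : α) (n : Nat) (m : List α)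
    (hn : n ≤ m.length) :
    (List.range n).foldl (fun m k => m.modify k (f k)) m
      = (List.range n).map (fun k => f k (m.getD k d)) ++ m.drop n := by
  induction n with
  | zero => simp
  | succ n ih =>
    rw [List.range_succ, List.foldl_append, ih (Nat.le_of_succ_le hn)]
    simp only [List.foldl_cons, List.foldl_nil, List.map_append, List.map_cons, List.map_nil]
    set P := (List.range n).map (fun k => f k (m.getD k d)) with hPdef
    have hP : P.length = n := by simp [hPdef]
    have hlt : n < (P ++ m.drop n).length := by simp [hP]; omega
    have htk : (P ++ m.drop n).take n = P := by
      rw [List.take_append_of_le_length (by omega), List.take_of_length_le (by omega)]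
    have hget : (P ++ m.drop n)[n]'hlt = m[n] := by
      rw [List.getElem_append_right (by omega)]
      simp [hP]
      rfl
    have hdr : (P ++ m.drop n).drop (n + 1) = m.drop (n + 1) := by
      rw [List.drop_append, hP, List.drop_drop]
      simp [hP]
    rw [List.modify_eq_take_cons_drop hlt, htk, hget, hdr, List.getD_eq_getElem m d hn]
    simp

-- range-indexed map over a list is List.map
theorem pv_map_range {α β : Type} (l : List α) (h : α → β) (d : α) :
    (List.range l.length).map (fun k => h (l.getD k d)) = l.map h := by
  apply List.ext_getElem (by simp)
  intro j h1 h2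
  have hj : j < l.length := by simpa using h2
  simp [List.getElem?_eq_getElem hj]

-- A's result in closed form: truncated-and-padded rows, then zero rows
theorem pv_solution_closed (a : List Int) (t : List (List Int))
    (hrow : ∀ r ∈ a :: t, a.length ≤ r.length) :
    solution (a :: t)
      = (a :: t).map (fun row => row.take a.length
          ++ List.replicate (max (a :: t).length a.length - a.length) 0)
        ++ List.replicate (max (a :: t).length a.length - (a :: t).length)
            (List.replicate (max (a :: t).length a.length) 0) := by
  unfold solution
  simp only [PySem.List.pyRange_one, PySem.List.pyGetD_natCast, List.foldl_map,
    Int.toNat_natCast, Int.sub_zero, Int.zero_add]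
  have h0 : PySem.List.pyGetD (a :: t) 0 [] = a := by
    simp [PySem.List.pyGetD, PySem.List.pyGet?, PySem.List.pyIdx?]
  rw [h0]
  have hmax : (max ((a :: t).length : Int) (a.length : Int)).toNat
      = max (a :: t).length a.length := by
    rw [← Nat.cast_max, Int.toNat_natCast]
  rw [hmax]
  simp only [pv_foldl_modify]
  rw [pv_outer_loop
    (fun k r => (List.range a.length).foldl
      (fun r j => r.set j (((a :: t).getD k []).getD j 0)) r) []
    (a :: t).length _ (by simp)]
  rw [List.drop_replicate]
  have hmap : (List.range (a :: t).length).map (fun k =>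
      (List.range a.length).foldl (fun r j => r.set j (((a :: t).getD k []).getD j 0))
        ((List.replicate (max (a :: t).length a.length)
          (List.replicate (max (a :: t).length a.length) (0:Int))).getD k []))
      = (List.range (a :: t).length).map (fun k =>
        ((a :: t).getD k []).take a.length
          ++ List.replicate (max (a :: t).length a.length - a.length) 0) := by
    apply List.map_congr_left
    intro k hk
    have hkR : k < (a :: t).length := List.mem_range.mp hk
    have hkL : k < max (a :: t).length a.length := lt_of_lt_of_le hkR (le_max_left _ _)
    rw [List.getD_replicate _ hkL]
    have hrk : a.length ≤ ((a :: t).getD k []).length := by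
      have hm : (a :: t).getD k [] ∈ a :: t := by
        rw [List.getD_eq_getElem _ _ hkR]
        exact List.getElem_mem _
      exact hrow _ hm
    rw [pv_inner_loop _ _ a.length hrk (by simp), List.drop_replicate]
  rw [hmap, pv_map_range (a :: t)
    (fun row => row.take a.length
      ++ List.replicate (max (a :: t).length a.length - a.length) 0) []]

-- growing while rows ≤ cols appends the missing zero rows
theorem pv_grow_le (k : Nat) : ∀ (m : List (List Int)) (r c : Nat), c = r + k →
    grow m r c = m ++ List.replicate k (List.replicate c 0) := by
  induction k with
  | zero =>
    intro m r c h
    rw [grow]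
    simp [h]
  | succ n ih =>
    intro m r c h
    rw [grow]
    have hlt : r < c := by omega
    simp only [hlt, if_true]
    rw [ih (m ++ [List.replicate c 0]) (r + 1) c (by omega)]
    simp [List.replicate_succ]

-- growing while cols ≤ rows pads every row with the missing zeros
theorem pv_grow_ge (k : Nat) : ∀ (m : List (List Int)) (r c : Nat), r = c + k →
    grow m r c = m.map (fun row => row ++ List.replicate k 0) := by
  induction k with
  | zero =>
    intro m r c h
    rw [grow]
    simp [h]
  | succ n ih =>
    intro m r c h
    rw [grow]
    have h1 : ¬ r < c := by omega
    have h2 : c < r := by omega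
    simp only [h1, if_false, h2, if_true]
    rw [ih (m.map (fun row => row ++ [0])) r (c + 1) (by omega)]
    simp [List.map_map, Function.comp, List.replicate_succ, List.append_assoc]

-- ===== VERDICT (by name: the statement is the Claim_ definition above) =====
theorem solution_spec : Claim_equal_solution := by
  intro arr _ hpre
  obtain ⟨hne, hrow⟩ := hpre
  obtain ⟨a, t, rfl⟩ : ∃ a t, arr = a :: t := by
    cases arr with
    | nil => exact absurd rfl hne
    | cons a t => exact ⟨a, t, rfl⟩
  have hrow' : ∀ r ∈ a :: t, a.length ≤ r.length := by simpa using hrow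
  unfold Spec_solution solution_alt
  rw [pv_solution_closed a t hrow']
  simp only [List.headD_cons]
  by_cases hc : (a :: t).length ≤ a.length
  · have hmax : max (a :: t).length a.length = a.length := by omega
    rw [pv_grow_le (a.length - (a :: t).length) _ _ _ (by omega), hmax]
    simp
  · have hmax : max (a :: t).length a.length = (a :: t).length := by omega
    rw [pv_grow_ge ((a :: t).length - a.length) _ _ _ (by omega), hmax]
    simp [List.map_map, Function.comp]
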